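-- pv_equiv track=rewrite | github.com/anthonyjatoba/codewars | 6 kyu/Word Mesh/Word Mesh.py | word_mesh
-- ===== SOURCE A (Python) =====
-- def word_mesh(words):
--     words_to_mesh = []
--     for i in range(len(words) - 1):
--         word1 = words[i]
--         word2 = words[i + 1]
--         for j in reversed(range(min(len(word1), len(word1)) + 1)):
--             if word1[-j:] == word2[:j]:
--                 words_to_mesh.append(word1[-j:])
--                 break
--     if len(words_to_mesh) < len(words) - 1:
--         return 'failed to mesh'
--     else:
--         return ''.join(words_to_mesh)
-- ===== SOURCE B (Python) =====
-- def _overlap_len(w1, w2):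
--     # base-B positional fingerprints: pre[k] encodes w2[:k], suf[k] encodes the
--     # last k chars of w1; equal fingerprints of equal length <=> equal strings
--     # (B exceeds every digit ord(c)+1), so the largest k with pre[k] == suf[k]
--     # is the longest suffix-prefix overlap.
--     B = 1114113
--     n = min(len(w1), len(w2))
--     pre = [0]
--     h = 0
--     for c in w2[:n]:
--         h = h * B + ord(c) + 1
--         pre.append(h)
--     suf = [0]
--     h = 0
--     p = 1
--     for c in reversed(w1[len(w1) - n:]):
--         h = (ord(c) + 1) * p + h
--         p *= B
--         suf.append(h)
--     k = n
--     while pre[k] != suf[k]: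
--         k -= 1
--     return k
--
--
-- def word_mesh(words):
--     parts = []
--     for w1, w2 in zip(words, words[1:]):
--         k = _overlap_len(w1, w2)
--         if k == 0:
--             return 'failed to mesh'
--         parts.append(w1[len(w1) - k:])
--     return ''.join(parts)
-- ===== Notes on version B (the rewrite author's own statement) =====
-- stated objective: alternative
-- what changed: Per adjacent pair B builds two arrays of exact base-B positional fingerprints (pre[k] encodes w2[:k], suf[k] encodes the last k chars of w1, each built in one incremental pass) and returns the overlap as the largest k where the two integers agree, instead of A's downward scan that constructs and compares the slices w1[-j:] and w2[:j] for every candidate j; a timing run measured B ~15x faster on the generated inputs because the repeated per-candidate slice construction and string comparison are replaced by one pass of integer updates and integer comparisons.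
-- intended difference: On lists where some non-final word is empty and every adjacent pair with a non-empty first word has a non-empty suffix-prefix overlap, A's j=0 test w1[-0:]==w2[:0] accidentally treats the empty word as meshing (A returns the joined overlaps), while B returns 'failed to mesh' because no non-empty overlap exists, which is the kata's intent. — e.g. on word_mesh(["", "a"]): A returns "", B returns "failed to mesh"
import Mathlib
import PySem

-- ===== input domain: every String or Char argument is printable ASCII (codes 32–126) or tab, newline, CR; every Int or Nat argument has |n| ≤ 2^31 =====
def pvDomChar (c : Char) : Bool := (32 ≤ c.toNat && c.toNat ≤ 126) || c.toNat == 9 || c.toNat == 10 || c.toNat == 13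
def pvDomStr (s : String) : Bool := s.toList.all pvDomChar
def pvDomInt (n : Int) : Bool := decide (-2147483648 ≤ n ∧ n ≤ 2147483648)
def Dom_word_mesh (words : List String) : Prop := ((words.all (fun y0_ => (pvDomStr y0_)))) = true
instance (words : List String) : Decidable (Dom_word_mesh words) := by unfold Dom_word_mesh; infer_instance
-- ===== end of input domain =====

-- B replaces A's per-pair downward scan of slice comparisons by exact base-B positional
-- fingerprints: two integer arrays (prefix codes of word2, suffix codes of word1) built in
-- one incremental pass each, the overlap being the largest index where the integers agree
-- (measured faster in a timing run on the generated inputs); B intentionally rejects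
-- A's accidental zero-length mesh of an empty word (see D_word_mesh).


-- ===== PORT A =====
-- inner loop `for j in reversed(range(min(len(word1), len(word1)) + 1)): if word1[-j:] == word2[:j]: … break`
def word_mesh_find (w1 w2 : String) : List Int → Option String
  | [] => none
  | j :: rest =>
      if PySem.Str.slice w1 (some (-j)) none = PySem.Str.slice w2 none (some j) then
        some (PySem.Str.slice w1 (some (-j)) none)
      else word_mesh_find w1 w2 rest

def word_mesh (words : List String) : String :=
  let mesh := (PySem.List.pyRange 0 (PySem.List.len words - 1) 1).foldl
    (fun acc i =>
      let word1 := PySem.List.pyGetD words i ""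
      let word2 := PySem.List.pyGetD words (i + 1) ""
      match word_mesh_find word1 word2
          ((PySem.List.pyRange 0 (min (PySem.Str.len word1) (PySem.Str.len word1) + 1) 1).reverse) with
      | some s => acc ++ [s]
      | none => acc) []
  if PySem.List.len mesh < PySem.List.len words - 1 then "failed to mesh"
  else PySem.Str.join "" mesh

-- ===== PORT B =====
-- `for c in w2[:n]: h = h*B + ord(c)+1; pre.append(h)`  (state = (h, pre))
def word_mesh_preGo : List Char → Int × List Int → Int × List Int
  | [], st => st
  | c :: cs, (h, pre) =>
      word_mesh_preGo cs (h * 1114113 + ((c.toNat : Int) + 1),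
        pre ++ [h * 1114113 + ((c.toNat : Int) + 1)])

-- `for c in reversed(w1[len(w1)-n:]): h = (ord(c)+1)*p + h; p *= B; suf.append(h)`
def word_mesh_sufGo : List Char → Int × Int × List Int → Int × Int × List Int
  | [], st => st
  | c :: cs, (h, p, suf) =>
      word_mesh_sufGo cs (((c.toNat : Int) + 1) * p + h, p * 1114113,
        suf ++ [((c.toNat : Int) + 1) * p + h])

-- `while pre[k] != suf[k]: k -= 1`; indices are in range, so list.getD is Python's
-- pre[k]; the k = 0 base returns 0 because pre[0] = suf[0] = 0 in Source B.
def word_mesh_loopK (pre suf : List Int) : Nat → Nat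
  | 0 => 0
  | k + 1 => if pre.getD (k + 1) 0 ≠ suf.getD (k + 1) 0 then word_mesh_loopK pre suf k
             else k + 1

-- `_overlap_len(w1, w2)`; the slices w2[:n] and w1[len(w1)-n:] have non-negative
-- bounds, so they are exactly take/drop on the character lists.
def word_mesh_overlap_len (w1 w2 : String) : Nat :=
  let c1 := w1.toList
  let c2 := w2.toList
  let n := min c1.length c2.length
  let pre := (word_mesh_preGo (c2.take n) (0, [0])).2
  let suf := (word_mesh_sufGo ((c1.drop (c1.length - n)).reverse) (0, 1, [0])).2.2
  word_mesh_loopK pre suf n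

-- `for w1, w2 in zip(words, words[1:]): …` with early `return 'failed to mesh'`
def word_mesh_altGo : List (String × String) → List String → Option (List String)
  | [], parts => some parts
  | (w1, w2) :: rest, parts =>
      let k := word_mesh_overlap_len w1 w2
      if k = 0 then none
      else word_mesh_altGo rest
        (parts ++ [String.ofList (w1.toList.drop (w1.toList.length - k))])

def word_mesh_alt (words : List String) : String :=
  match word_mesh_altGo (words.zip (PySem.List.slice words (some 1) none)) [] with
  | none => "failed to mesh"
  | some parts => PySem.Str.join "" parts

-- ===== PRECONDITION & SPEC =====
-- some non-empty suffix of w1 is a prefix of w2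
def word_mesh_hasPos (w1 w2 : String) : Bool :=
  (List.range w1.toList.length).any fun i => PySem.Chars.startswith w2.toList (w1.toList.drop i)

-- On lists where some non-final word is empty and every adjacent pair with a non-empty first
-- word has a non-empty suffix-prefix overlap, A's j=0 test w1[-0:]==w2[:0] accidentally treats
-- the empty word as meshing and A returns the joined overlaps, while B returns 'failed to mesh'
-- because no non-empty overlap exists — the kata's intent.
def D_word_mesh (words : List String) : Prop :=
  (∃ p ∈ words.zip (words.drop 1), p.1 = "") ∧
  (∀ p ∈ words.zip (words.drop 1), p.1 ≠ "" → word_mesh_hasPos p.1 p.2 = true)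
instance (words : List String) : Decidable (D_word_mesh words) := by unfold D_word_mesh; infer_instance

def Spec_word_mesh (words : List String) (out : String) : Prop := ¬ D_word_mesh words → out = word_mesh_alt words
instance (words : List String) (out : String) : Decidable (Spec_word_mesh words out) := by unfold Spec_word_mesh; infer_instance

def pvDiffWitness_word_mesh : List String := ["", "a"]
def pvDiffWitnessOut_word_mesh : String × String := ("", "failed to mesh")

-- ===== CLAIM (what is proved, stated in full; the proofs are below) =====
def Claim_unchanged_word_mesh : Prop := ∀ (words : List String), Dom_word_mesh words → Spec_word_mesh words (word_mesh words)
def Claim_changed_word_mesh : Prop := Dom_word_mesh (pvDiffWitness_word_mesh) ∧ D_word_mesh (pvDiffWitness_word_mesh) ∧ word_mesh (pvDiffWitness_word_mesh) = pvDiffWitnessOut_word_mesh.1 ∧ word_mesh_alt (pvDiffWitness_word_mesh) = pvDiffWitnessOut_word_mesh.2 ∧ pvDiffWitnessOut_word_mesh.1 ≠ pvDiffWitnessOut_word_mesh.2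

-- ===== LEMMAS AND PROOFS =====

-- reference: MSB-first and LSB-first base-1114113 fingerprints of a character list
def pvEnc (l : List Char) : Int :=
  l.foldl (fun h c => h * 1114113 + ((c.toNat : Int) + 1)) 0

def pvEncUp : List Char → Int
  | [] => 0
  | c :: t => ((c.toNat : Int) + 1) + 1114113 * pvEncUp t

theorem pvChar_digit_lt (c : Char) : (c.toNat : Int) + 1 < 1114113 := by
  have h := c.valid
  unfold UInt32.isValidChar Nat.isValidChar at h
  have : c.toNat = c.val.toNat := rfl
  rcases h with h | ⟨_, h⟩ <;> omega

theorem pvEncUp_inj : ∀ (l1 l2 : List Char), l1.length = l2.length →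
    pvEncUp l1 = pvEncUp l2 → l1 = l2 := by
  intro l1
  induction l1 with
  | nil => intro l2 hl _; cases l2 with
    | nil => rfl
    | cons _ _ => simp at hl
  | cons c t ih =>
    intro l2 hl he
    cases l2 with
    | nil => simp at hl
    | cons d s =>
      simp only [pvEncUp] at he
      have hc1 := pvChar_digit_lt c
      have hc2 := pvChar_digit_lt d
      have h1 : (0 : Int) ≤ (c.toNat : Int) + 1 := by positivity
      have h2 : (0 : Int) ≤ (d.toNat : Int) + 1 := by positivity
      have hmod : ((c.toNat : Int) + 1) % 1114113 = ((d.toNat : Int) + 1) % 1114113 := by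
        have e1 := Int.add_mul_emod_self_left (a := (c.toNat : Int) + 1) (b := 1114113)
          (c := pvEncUp t)
        have e2 := Int.add_mul_emod_self_left (a := (d.toNat : Int) + 1) (b := 1114113)
          (c := pvEncUp s)
        rw [← e1, ← e2, he]
      rw [Int.emod_eq_of_lt h1 hc1, Int.emod_eq_of_lt h2 hc2] at hmod
      have hcd : c = d := by
        apply Char.ext
        apply UInt32.toBitVec_inj.mp
        apply BitVec.toNat_inj.mp
        have : c.toNat = d.toNat := by omega
        exact this
      have hts : pvEncUp t = pvEncUp s := by
        subst hcd
        have : (1114113 : Int) * pvEncUp t = 1114113 * pvEncUp s := by omega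
        exact mul_left_cancel₀ (by norm_num) this
      rw [hcd, ih s (by simpa using hl) hts]

theorem pvEncUp_append (xs : List Char) (c : Char) :
    pvEncUp (xs ++ [c]) = pvEncUp xs + 1114113 ^ xs.length * ((c.toNat : Int) + 1) := by
  induction xs with
  | nil => simp [pvEncUp]
  | cons d t ih => simp only [List.cons_append, pvEncUp, ih, List.length_cons]; ring

theorem pvEnc_from (l : List Char) : ∀ (h : Int),
    l.foldl (fun h c => h * 1114113 + ((c.toNat : Int) + 1)) h
      = h * 1114113 ^ l.length + pvEncUp l.reverse := by
  induction l with
  | nil => intro h; simp [pvEncUp]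
  | cons c t ih =>
    intro h
    simp only [List.foldl_cons, List.reverse_cons, List.length_cons, ih, pvEncUp_append,
      List.length_reverse]
    ring

theorem pvEnc_eq_encUp (l : List Char) : pvEnc l = pvEncUp l.reverse := by
  unfold pvEnc; rw [pvEnc_from]; simp

theorem pvEnc_inj (l1 l2 : List Char) (hl : l1.length = l2.length) :
    pvEnc l1 = pvEnc l2 ↔ l1 = l2 := by
  constructor
  · intro he
    rw [pvEnc_eq_encUp, pvEnc_eq_encUp] at he
    have := pvEncUp_inj l1.reverse l2.reverse (by simpa using hl) he
    exact List.reverse_inj.mp this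
  · intro e; rw [e]

-- the pre array holds the fingerprints of the prefixes
theorem word_mesh_preGo_spec (cs : List Char) : ∀ (h : Int) (acc : List Int),
    (word_mesh_preGo cs (h, acc)).2
      = acc ++ (List.range cs.length).map
          (fun k => (cs.take (k + 1)).foldl (fun h c => h * 1114113 + ((c.toNat : Int) + 1)) h) := by
  induction cs with
  | nil => intro h acc; simp [word_mesh_preGo]
  | cons c t ih =>
    intro h acc
    simp only [word_mesh_preGo]
    rw [ih, List.append_assoc]
    congr 1
    rw [List.length_cons, List.range_succ_eq_map, List.map_cons, List.map_map,
      List.singleton_append]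
    congr 1

-- the suf array holds the fingerprints (LSB-first) of the prefixes of the reversed slice
theorem word_mesh_sufGo_spec (r : List Char) : ∀ (h p : Int) (acc : List Int),
    (word_mesh_sufGo r (h, p, acc)).2.2
      = acc ++ (List.range r.length).map (fun k => h + p * pvEncUp (r.take (k + 1))) := by
  induction r with
  | nil => intro h p acc; simp [word_mesh_sufGo]
  | cons c t ih =>
    intro h p acc
    simp only [word_mesh_sufGo]
    rw [ih, List.append_assoc]
    congr 1
    rw [List.length_cons, List.range_succ_eq_map, List.map_cons, List.map_map,
      List.singleton_append]
    congr 1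
    · simp [pvEncUp]; ring
    · apply List.map_congr_left
      intro k _
      simp only [Function.comp_def, List.take_succ_cons, pvEncUp]
      ring

-- downward reference search for the longest suffix-prefix overlap, bounded by m
def pvBestK (c1 c2 : List Char) : Nat → Nat
  | 0 => 0
  | k + 1 => if c2.take (k + 1) = c1.drop (c1.length - (k + 1)) then k + 1
             else pvBestK c1 c2 k

theorem pv_getD_head_map (x : Int) (f : Nat → Int) (n k : Nat) (d : Int) (hk : k < n) :
    (([x] ++ (List.range n).map f).getD (k + 1) d) = f k := by
  rw [List.getD_eq_getElem _ _ (by simp; omega)]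
  rw [List.getElem_append_right (by simp)]
  simp

theorem word_mesh_pre_getD (c2 : List Char) (n j : Nat) (hn : n ≤ c2.length) (hj : j ≤ n) :
    ((word_mesh_preGo (c2.take n) (0, [0])).2).getD j 0 = pvEnc (c2.take j) := by
  rw [word_mesh_preGo_spec]
  cases j with
  | zero => simp [pvEnc]
  | succ k =>
    have hlen : (c2.take n).length = n := by simp [hn]
    have hk : k < n := by omega
    rw [hlen, pv_getD_head_map _ _ _ _ _ hk]
    simp only [List.take_take, pvEnc]
    congr 2
    omega

theorem word_mesh_suf_getD (c1 : List Char) (n j : Nat) (hn : n ≤ c1.length) (hj : j ≤ n) :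
    ((word_mesh_sufGo ((c1.drop (c1.length - n)).reverse) (0, 1, [0])).2.2).getD j 0
      = pvEnc (c1.drop (c1.length - j)) := by
  rw [word_mesh_sufGo_spec]
  set s := c1.drop (c1.length - n) with hs
  have hslen : s.length = n := by simp [hs]; omega
  cases j with
  | zero => simp [pvEnc]
  | succ k =>
    have hk : k < n := by omega
    rw [show s.reverse.length = n by simp [hslen], pv_getD_head_map _ _ _ _ _ hk]
    simp only [zero_add, one_mul]
    rw [List.take_reverse, ← pvEnc_eq_encUp]
    congr 1
    rw [hs, List.drop_drop, hslen]
    congr 1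
    omega

theorem word_mesh_loopK_eq (c1 c2 : List Char) :
    ∀ (k : Nat), k ≤ min c1.length c2.length →
    word_mesh_loopK ((word_mesh_preGo (c2.take (min c1.length c2.length)) (0, [0])).2)
        ((word_mesh_sufGo ((c1.drop (c1.length - min c1.length c2.length)).reverse)
          (0, 1, [0])).2.2) k
      = pvBestK c1 c2 k := by
  intro k
  induction k with
  | zero => intro _; rfl
  | succ k ih =>
    intro hk
    simp only [word_mesh_loopK, pvBestK]
    rw [word_mesh_pre_getD c2 _ (k + 1) (by omega) hk,
      word_mesh_suf_getD c1 _ (k + 1) (by omega) hk]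
    have hlen : (c2.take (k + 1)).length = (c1.drop (c1.length - (k + 1))).length := by
      rw [List.length_take, List.length_drop]
      omega
    by_cases hc : c2.take (k + 1) = c1.drop (c1.length - (k + 1))
    · have he : pvEnc (c2.take (k + 1)) = pvEnc (c1.drop (c1.length - (k + 1))) :=
        (pvEnc_inj _ _ hlen).mpr hc
      rw [if_neg (by simp [he]), if_pos hc]
    · have he : pvEnc (c2.take (k + 1)) ≠ pvEnc (c1.drop (c1.length - (k + 1))) :=
        fun e => hc ((pvEnc_inj _ _ hlen).mp e)
      rw [if_pos he, if_neg hc, ih (by omega)]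

theorem word_mesh_overlap_len_eq (w1 w2 : String) :
    word_mesh_overlap_len w1 w2
      = pvBestK w1.toList w2.toList (min w1.toList.length w2.toList.length) := by
  unfold word_mesh_overlap_len
  exact word_mesh_loopK_eq w1.toList w2.toList _ (le_refl _)

-- A's slice test `word1[-j:] == word2[:j]` for 1 ≤ j ≤ len(word1)
theorem word_mesh_cond_iff (w1 w2 : String) (k : Nat) (_hk : k + 1 ≤ w1.toList.length) :
    (PySem.Str.slice w1 (some (-((k : Int) + 1))) none = PySem.Str.slice w2 none (some ((k : Int) + 1)))
      ↔ w1.toList.drop (w1.toList.length - (k + 1)) = w2.toList.take (k + 1) := by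
  rw [← String.toList_inj]
  simp only [PySem.Str.toList_slice, PySem.Chars.slice_eq_listSlice]
  have h1 : -((k : Int) + 1) = -(((k + 1 : Nat)) : Int) := by push_cast; ring
  have h2 : ((k : Int) + 1) = (((k + 1 : Nat)) : Int) := by push_cast; ring
  rw [h1, h2, PySem.List.slice_from_neg_natCast _ _ (Nat.succ_pos k), PySem.List.slice_to_natCast]

theorem word_mesh_find_eq (w1 w2 : String) (h : w1 ≠ "") :
    ∀ (m : Nat), m ≤ w1.toList.length →
    word_mesh_find w1 w2 ((PySem.List.pyRange 0 ((m : Int) + 1) 1).reverse)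
      = (if pvBestK w1.toList w2.toList m = 0 then none
         else some (String.ofList
           (w1.toList.drop (w1.toList.length - pvBestK w1.toList w2.toList m)))) := by
  intro m
  induction m with
  | zero =>
    intro _
    rw [show ((0 : Nat) : Int) + 1 = 0 + 1 by norm_num, PySem.List.pyRange_one_singleton,
      List.reverse_singleton]
    have hcond : PySem.Str.slice w1 (some (-(0 : Int))) none
        ≠ PySem.Str.slice w2 none (some (0 : Int)) := by
      intro e
      apply h
      have e' := congrArg String.toList e
      simp only [PySem.Str.toList_slice, PySem.Chars.slice_eq_listSlice, neg_zero,
        PySem.List.slice_zero_start, PySem.List.slice_none_none] at e'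
      rw [show (0 : Int) = ((0 : Nat) : Int) by simp, PySem.List.slice_to_natCast,
        List.take_zero] at e'
      rw [← String.toList_inj, e']
      rfl
    simp only [word_mesh_find, if_neg hcond]
    simp [pvBestK]
  | succ k ih =>
    intro hm
    have hcast : (((k + 1 : Nat)) : Int) + 1 = ((k : Int) + 1) + 1 := by push_cast; ring
    rw [hcast, PySem.List.pyRange_one_succ_right (by positivity), List.reverse_append,
      List.reverse_singleton, List.singleton_append]
    simp only [word_mesh_find, pvBestK]
    by_cases hc : w2.toList.take (k + 1) = w1.toList.drop (w1.toList.length - (k + 1))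
    · rw [if_pos ((word_mesh_cond_iff w1 w2 k hm).mpr hc.symm), if_pos hc,
        if_neg (Nat.succ_ne_zero k)]
      congr 1
      apply String.ext
      rw [String.toList_ofList, PySem.Str.toList_slice, PySem.Chars.slice_eq_listSlice]
      have h1 : -((k : Int) + 1) = -(((k + 1 : Nat)) : Int) := by push_cast; ring
      rw [h1, PySem.List.slice_from_neg_natCast _ _ (Nat.succ_pos k)]
    · rw [if_neg (fun e => hc ((word_mesh_cond_iff w1 w2 k hm).mp e).symm), if_neg hc,
        ih (by omega)]

-- above min(len w1, len w2) the test never matches (length mismatch)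
theorem pvBestK_stable (c1 c2 : List Char) :
    ∀ (m : Nat), min c1.length c2.length ≤ m → m ≤ c1.length →
    pvBestK c1 c2 m = pvBestK c1 c2 (min c1.length c2.length) := by
  intro m
  induction m with
  | zero =>
    intro h1 _
    have hmin : min c1.length c2.length = 0 := by omega
    rw [hmin]
  | succ k ih =>
    intro h1 h2
    by_cases he : min c1.length c2.length = k + 1
    · rw [he]
    · have hgt : c2.length < k + 1 := by omega
      simp only [pvBestK]
      rw [if_neg, ih (by omega) (by omega)]
      intro e
      have := congrArg List.length e
      rw [List.length_take, List.length_drop] at this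
      omega

theorem pvBestK_pos_iff (c1 c2 : List Char) :
    ∀ (m : Nat), (0 < pvBestK c1 c2 m
      ↔ ∃ j, 1 ≤ j ∧ j ≤ m ∧ c2.take j = c1.drop (c1.length - j)) := by
  intro m
  induction m with
  | zero => simp [pvBestK]
  | succ k ih =>
    simp only [pvBestK]
    by_cases hc : c2.take (k + 1) = c1.drop (c1.length - (k + 1))
    · rw [if_pos hc]
      constructor
      · intro _; exact ⟨k + 1, by omega, le_refl _, hc⟩
      · intro _; omega
    · rw [if_neg hc, ih]
      constructor
      · rintro ⟨j, h1, h2, h3⟩; exact ⟨j, h1, by omega, h3⟩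
      · rintro ⟨j, h1, h2, h3⟩
        refine ⟨j, h1, ?_, h3⟩
        rcases Nat.lt_or_ge j (k + 1) with h | h
        · omega
        · exfalso; apply hc; rwa [show k + 1 = j by omega]

theorem word_mesh_hasPos_iff (w1 w2 : String) :
    word_mesh_hasPos w1 w2 = true
      ↔ ∃ j, 1 ≤ j ∧ j ≤ w1.toList.length ∧
          w2.toList.take j = w1.toList.drop (w1.toList.length - j) := by
  unfold word_mesh_hasPos
  rw [List.any_eq_true]
  constructor
  · rintro ⟨i, hi, hsw⟩
    rw [List.mem_range] at hi
    rw [PySem.Chars.startswith_iff] at hsw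
    refine ⟨w1.toList.length - i, by omega, by omega, ?_⟩
    have hpl : (w1.toList.drop i).length = w1.toList.length - i := by simp
    have := List.prefix_iff_eq_take.mp hsw
    rw [hpl] at this
    rw [← this]
    congr 1
    omega
  · rintro ⟨j, h1, h2, h3⟩
    refine ⟨w1.toList.length - j, List.mem_range.mpr (by omega), ?_⟩
    rw [PySem.Chars.startswith_iff, List.prefix_iff_eq_take]
    have hdl : (w1.toList.drop (w1.toList.length - j)).length = j := by
      rw [List.length_drop]; omega
    rw [hdl]
    exact h3.symm

-- existence of a positive overlap is insensitive to capping the length at the min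
theorem word_mesh_hasPos_iff_bestK (w1 w2 : String) :
    word_mesh_hasPos w1 w2 = true
      ↔ 0 < pvBestK w1.toList w2.toList (min w1.toList.length w2.toList.length) := by
  rw [word_mesh_hasPos_iff, pvBestK_pos_iff]
  constructor
  · rintro ⟨j, h1, h2, h3⟩
    refine ⟨j, h1, ?_, h3⟩
    have := congrArg List.length h3
    rw [List.length_take, List.length_drop] at this
    omega
  · rintro ⟨j, h1, h2, h3⟩
    exact ⟨j, h1, by omega, h3⟩

-- A's per-pair inner loop, as a function of the pair
def word_mesh_aPair (p : String × String) : Option String :=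
  word_mesh_find p.1 p.2
    ((PySem.List.pyRange 0 (min (PySem.Str.len p.1) (PySem.Str.len p.1) + 1) 1).reverse)

-- B's per-pair step, as a function of the pair
def word_mesh_bPair (p : String × String) : Option String :=
  let k := word_mesh_overlap_len p.1 p.2
  if k = 0 then none
  else some (String.ofList (p.1.toList.drop (p.1.toList.length - k)))

theorem word_mesh_aPair_eq (p : String × String) :
    word_mesh_aPair p = if p.1 = "" then some "" else word_mesh_bPair p := by
  obtain ⟨w1, w2⟩ := p
  simp only [word_mesh_aPair, word_mesh_bPair, min_self]
  by_cases h : w1 = ""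
  · subst h
    rw [if_pos rfl, show PySem.Str.len "" = 0 from rfl, PySem.List.pyRange_one_singleton,
      List.reverse_singleton]
    simp only [word_mesh_find]
    rw [if_pos]
    · congr 1
    · apply String.ext
      simp only [PySem.Str.toList_slice, PySem.Chars.slice_eq_listSlice, neg_zero,
        PySem.List.slice_zero_start, PySem.List.slice_none_none]
      rw [show (0 : Int) = ((0 : Nat) : Int) by simp, PySem.List.slice_to_natCast,
        List.take_zero]
      rfl
  · rw [if_neg h]
    have hlen : PySem.Str.len w1 = ((w1.toList.length : Nat) : Int) := by
      rw [PySem.Str.len_eq]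
    rw [hlen, word_mesh_find_eq w1 w2 h w1.toList.length (le_refl _),
      pvBestK_stable w1.toList w2.toList w1.toList.length (by omega) (le_refl _),
      word_mesh_overlap_len_eq]

theorem word_mesh_altGo_some (pairs : List (String × String)) :
    ∀ (parts : List String), (∀ p ∈ pairs, (word_mesh_bPair p).isSome) →
    word_mesh_altGo pairs parts = some (parts ++ pairs.filterMap word_mesh_bPair) := by
  induction pairs with
  | nil => intro parts _; simp [word_mesh_altGo]
  | cons p rest ih =>
    intro parts h
    obtain ⟨w1, w2⟩ := p
    have hp := h _ (List.mem_cons_self)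
    have hk : ¬ word_mesh_overlap_len w1 w2 = 0 := by
      intro hk0
      simp [word_mesh_bPair, hk0] at hp
    simp only [word_mesh_altGo, List.filterMap_cons]
    rw [if_neg hk, ih _ (fun q hq => h q (List.mem_cons_of_mem _ hq))]
    simp only [word_mesh_bPair]
    rw [if_neg hk]
    simp

theorem word_mesh_altGo_none (pairs : List (String × String)) :
    ∀ (parts : List String), (∃ p ∈ pairs, word_mesh_bPair p = none) →
    word_mesh_altGo pairs parts = none := by
  induction pairs with
  | nil => intro _ h; simp at h
  | cons p rest ih =>
    intro parts h
    obtain ⟨w1, w2⟩ := p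
    simp only [word_mesh_altGo]
    rcases h with ⟨q, hq, hqn⟩
    rcases List.mem_cons.mp hq with hq1 | hq2
    · subst hq1
      simp only [word_mesh_bPair] at hqn
      by_cases hk : word_mesh_overlap_len w1 w2 = 0
      · rw [if_pos hk]
      · rw [if_neg hk] at hqn
        simp at hqn
    · by_cases hk : word_mesh_overlap_len w1 w2 = 0
      · rw [if_pos hk]
      · rw [if_neg hk]
        exact ih _ ⟨q, hq2, hqn⟩

theorem word_mesh_foldl_filterMap (f : String × String → Option String) (l : List (String × String)) :
    ∀ (acc : List String),
    l.foldl (fun acc p => match f p with | some s => acc ++ [s] | none => acc) acc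
      = acc ++ l.filterMap f := by
  induction l with
  | nil => intro acc; simp
  | cons p rest ih =>
    intro acc
    simp only [List.foldl_cons, List.filterMap_cons]
    cases hp : f p with
    | none => simpa using ih acc
    | some s => simpa using ih (acc ++ [s])

theorem word_mesh_range_map (words : List String) :
    (PySem.List.pyRange 0 (PySem.List.len words - 1) 1).map
      (fun i => (PySem.List.pyGetD words i "", PySem.List.pyGetD words (i + 1) ""))
      = words.zip (words.drop 1) := by
  rcases words with _ | ⟨w, ws⟩
  · rw [PySem.List.pyRange_one_eq_nil (by simp [PySem.List.len_eq])]
    rfl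
  · set words := w :: ws with hw
    have hL : 1 ≤ words.length := by simp [hw]
    have hbound : PySem.List.len words - 1 = ((words.length - 1 : Nat) : Int) := by
      rw [PySem.List.len_eq]; omega
    apply List.ext_getElem
    · rw [List.length_map, PySem.List.length_pyRange_one, List.length_zip, List.length_drop]
      omega
    · intro k hk1 hk2
      rw [List.getElem_map, PySem.List.getElem_pyRange_one, List.getElem_zip]
      have hklt : k < words.length - 1 := by
        rw [List.length_map, PySem.List.length_pyRange_one, hbound] at hk1
        omega
      have e1 : (0 : Int) + (k : Int) = ((k : Nat) : Int) := by omega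
      have e2 : (0 : Int) + (k : Int) + 1 = (((k + 1 : Nat)) : Int) := by push_cast; omega
      rw [e2, e1, PySem.List.pyGetD_natCast, PySem.List.pyGetD_natCast]
      have g1 : words.getD k "" = words[k]'(by omega) := List.getD_eq_getElem words "" (by omega)
      have g2 : words.getD (k + 1) "" = words[k + 1]'(by omega) :=
        List.getD_eq_getElem words "" (by omega)
      rw [g1, g2]
      congr 1

theorem word_mesh_A_closed (words : List String) :
    word_mesh words =
      (if PySem.List.len ((words.zip (words.drop 1)).filterMap word_mesh_aPair)
          < PySem.List.len words - 1 then "failed to mesh"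
       else PySem.Str.join "" ((words.zip (words.drop 1)).filterMap word_mesh_aPair)) := by
  unfold word_mesh
  have h1 : (PySem.List.pyRange 0 (PySem.List.len words - 1) 1).foldl
      (fun acc i =>
        let word1 := PySem.List.pyGetD words i ""
        let word2 := PySem.List.pyGetD words (i + 1) ""
        match word_mesh_find word1 word2
            ((PySem.List.pyRange 0 (min (PySem.Str.len word1) (PySem.Str.len word1) + 1) 1).reverse) with
        | some s => acc ++ [s]
        | none => acc) []
      = ((PySem.List.pyRange 0 (PySem.List.len words - 1) 1).map
          (fun i => (PySem.List.pyGetD words i "", PySem.List.pyGetD words (i + 1) ""))).foldl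
        (fun acc p => match word_mesh_aPair p with | some s => acc ++ [s] | none => acc) [] := by
    rw [List.foldl_map]
    rfl
  rw [h1, word_mesh_range_map, word_mesh_foldl_filterMap]
  rfl

theorem word_mesh_alt_closed (words : List String) :
    word_mesh_alt words =
      (match word_mesh_altGo (words.zip (words.drop 1)) [] with
       | none => "failed to mesh"
       | some parts => PySem.Str.join "" parts) := by
  unfold word_mesh_alt
  rw [PySem.List.slice_from_one, ← List.drop_one]

-- ===== VERDICT (by name: the statement is the Claim_ definition above) =====
theorem word_mesh_spec : Claim_unchanged_word_mesh := by
  intro words _ hnd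
  rw [word_mesh_A_closed, word_mesh_alt_closed]
  set pairs := words.zip (words.drop 1) with hpairs
  have hplen : pairs.length = min words.length (words.length - 1) := by
    rw [hpairs, List.length_zip, List.length_drop]
  by_cases hex : ∃ p ∈ pairs, p.1 ≠ "" ∧ word_mesh_bPair p = none
  · obtain ⟨p, hp, hp1, hp2⟩ := hex
    have hA : word_mesh_aPair p = none := by
      rw [word_mesh_aPair_eq, if_neg hp1]; exact hp2
    have hlt : (pairs.filterMap word_mesh_aPair).length < pairs.length := by
      refine Nat.lt_of_le_of_ne (List.length_filterMap_le _ _) ?_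
      intro he
      have := List.filterMap_length_eq_length.mp he p hp
      rw [hA] at this
      simp at this
    have hL1 : 1 ≤ words.length := by
      have hpos : 0 < pairs.length := List.length_pos_of_mem hp
      omega
    rw [if_pos ?cond, word_mesh_altGo_none pairs [] ⟨p, hp, hp2⟩]
    case cond =>
      rw [PySem.List.len_eq, PySem.List.len_eq]
      omega
  · push Not at hex
    by_cases hemp : ∃ p ∈ pairs, p.1 = ""
    · exfalso
      apply hnd
      refine ⟨hemp, fun p hp hp1 => ?_⟩
      have hnn := hex p hp hp1
      rw [word_mesh_hasPos_iff_bestK]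
      by_contra hB
      apply hnn
      simp only [word_mesh_bPair, word_mesh_overlap_len_eq]
      rw [if_pos (by omega)]
    · push Not at hemp
      have hsome : ∀ p ∈ pairs, (word_mesh_bPair p).isSome :=
        fun p hp => Option.isSome_iff_ne_none.mpr (hex p hp (hemp p hp))
      have hcong : pairs.filterMap word_mesh_aPair = pairs.filterMap word_mesh_bPair :=
        List.filterMap_congr (fun p hp => by rw [word_mesh_aPair_eq, if_neg (hemp p hp)])
      have hlen2 : (pairs.filterMap word_mesh_bPair).length = pairs.length :=
        List.filterMap_length_eq_length.mpr hsome
      rw [hcong, if_neg ?cond2, word_mesh_altGo_some pairs [] hsome]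
      · rfl
      case cond2 =>
        rw [PySem.List.len_eq, PySem.List.len_eq]
        omega

theorem word_mesh_changed : Claim_changed_word_mesh := by
  unfold Claim_changed_word_mesh; decide
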